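-- pv_equiv track=rewrite | github.com/justin-almas/games | blackjack.py | dealer
-- ===== SOURCE A (Python) =====
-- def dealer(card):
--     a_is_11 = 0
--     a_is_1 = 0
--     for char in card:  # i think this still works with lists instead of strings
--         if char == "A":
--             a_is_1 += 1
--             a_is_11 += 11
--         elif char == "K" or char == "J" or char == "Q":
--             a_is_1 += 10
--             a_is_11 += 10
--         else:
--             a_is_1 += int(char)
--             a_is_11 += int(char)
--
--     if a_is_11 >= 17 and a_is_11 <= 21:
--         return "Stay"
--     elif a_is_1 >= 17 and a_is_1 <= 21:
--         return "Stay"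
--     elif a_is_1 < 17:
--         return "Hit"
--     else:
--         return "Bust"
-- ===== SOURCE B (Python) =====
-- def dealer(card):
--     aces = card.count("A")
--     faces = card.count("K") + card.count("Q") + card.count("J")
--     pips = sum(int(c) for c in card if c not in ("A", "K", "Q", "J"))
--     low = pips + 10 * faces + aces
--     high = low + 10 * aces
--     if 17 <= high <= 21 or 17 <= low <= 21:
--         return "Stay"
--     return "Hit" if low < 17 else "Bust"
-- ===== Notes on version B (the rewrite author's own statement) =====
-- stated objective: alternative
-- what changed: B replaces A's single branching loop with staged counting passes (card.count for aces and faces, a filtered sum for pip cards), derives low/high totals arithmetically, and merges A's two Stay branches into one disjunction.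
import Mathlib
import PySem

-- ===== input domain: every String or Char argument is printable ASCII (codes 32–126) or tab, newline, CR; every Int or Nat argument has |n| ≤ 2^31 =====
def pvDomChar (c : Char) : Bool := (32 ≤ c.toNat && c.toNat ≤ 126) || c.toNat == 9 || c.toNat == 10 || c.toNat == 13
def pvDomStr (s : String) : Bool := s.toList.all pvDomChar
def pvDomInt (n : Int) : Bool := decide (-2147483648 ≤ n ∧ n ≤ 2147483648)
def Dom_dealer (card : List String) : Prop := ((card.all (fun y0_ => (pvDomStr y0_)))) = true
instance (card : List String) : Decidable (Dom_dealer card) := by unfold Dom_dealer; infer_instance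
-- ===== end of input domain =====

-- B replaces A's single branching loop by staged counting passes (count aces/faces, sum
-- the filtered pip cards) with the totals derived arithmetically (objective: alternative).

-- ===== PORT A =====
-- A's loop: two parallel sums a_is_1, a_is_11. int(char) is total under Pre_ (ofStr? isSome).
def dealerFoldA (card : List String) (s : Int × Int) : Int × Int :=
  card.foldl (fun s ch =>
    if ch == "A" then (s.1 + 1, s.2 + 11)
    else if ch == "K" || ch == "J" || ch == "Q" then (s.1 + 10, s.2 + 10)
    else ((s.1 + (PySem.Int.ofStr? ch).getD 0), (s.2 + (PySem.Int.ofStr? ch).getD 0))) s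

def dealer (card : List String) : String :=
  let s := dealerFoldA card (0, 0)
  if 17 ≤ s.2 ∧ s.2 ≤ 21 then "Stay"
  else if 17 ≤ s.1 ∧ s.1 ≤ 21 then "Stay"
  else if s.1 < 17 then "Hit"
  else "Bust"

-- ===== PORT B =====
-- B: aces = card.count("A"); faces = counts of K/Q/J; pips = sum of int(c) over the
-- filtered non-letter cards; low/high derived arithmetically; one merged Stay test.
def dealerPips (card : List String) : Int :=
  (card.filter (fun c => !(c == "A" || c == "K" || c == "Q" || c == "J"))).foldl
    (fun s c => s + (PySem.Int.ofStr? c).getD 0) 0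

def dealer_alt (card : List String) : String :=
  let aces : Int := (card.count "A" : Int)
  let faces : Int := (card.count "K" : Int) + (card.count "Q" : Int) + (card.count "J" : Int)
  let low := dealerPips card + 10 * faces + aces
  let high := low + 10 * aces
  if (17 ≤ high ∧ high ≤ 21) ∨ (17 ≤ low ∧ low ≤ 21) then "Stay"
  else if low < 17 then "Hit"
  else "Bust"

-- ===== PRECONDITION & SPEC =====
-- Pre_ excludes exactly the inputs where A's int(char) raises ValueError (a card that is
-- neither A/K/J/Q nor an int()-parseable string); B raises there too.
def Pre_dealer (card : List String) : Prop :=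
  (card.all (fun ch =>
    ch == "A" || ch == "K" || ch == "J" || ch == "Q" || (PySem.Int.ofStr? ch).isSome)) = true
instance (card : List String) : Decidable (Pre_dealer card) := by unfold Pre_dealer; infer_instance

def pvWitness_dealer : List String := ["A", "K", "9"]

def Spec_dealer (card : List String) (out : String) : Prop := out = dealer_alt card
instance (card : List String) (out : String) : Decidable (Spec_dealer card out) := by unfold Spec_dealer; infer_instance

-- ===== CLAIM (what is proved, stated in full; the proofs are below) =====
def Claim_equal_dealer : Prop := ∀ (card : List String), Dom_dealer card → Pre_dealer card → Spec_dealer card (dealer card)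

-- ===== LEMMAS AND PROOFS =====
-- B's low total, named for the proofs
def dealerLow (card : List String) : Int :=
  dealerPips card + 10 * ((card.count "K" : Int) + (card.count "Q" : Int) + (card.count "J" : Int))
    + (card.count "A" : Int)

theorem low_cons_A (rest : List String) : dealerLow ("A" :: rest) = 1 + dealerLow rest := by
  simp [dealerLow, dealerPips]
  ring

theorem low_cons_face (ch : String) (rest : List String) (h : ch = "K" ∨ ch = "J" ∨ ch = "Q") :
    dealerLow (ch :: rest) = 10 + dealerLow rest := by
  rcases h with h | h | h <;> subst h <;>
    · simp [dealerLow, dealerPips]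
      ring

theorem pips_shift (l : List String) : ∀ (a : Int),
    l.foldl (fun s c => s + (PySem.Int.ofStr? c).getD 0) a
      = a + l.foldl (fun s c => s + (PySem.Int.ofStr? c).getD 0) 0 := by
  induction l with
  | nil => intro a; simp
  | cons u v ihv =>
    intro a
    simp only [List.foldl_cons]
    rw [ihv (a + _), ihv (0 + _)]
    ring

theorem low_cons_other (ch : String) (rest : List String) (hA : ¬ ch = "A")
    (hF : ¬ (ch = "K" ∨ ch = "J" ∨ ch = "Q")) :
    dealerLow (ch :: rest) = (PySem.Int.ofStr? ch).getD 0 + dealerLow rest := by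
  have hfil : (ch :: rest).filter (fun c => !(c == "A" || c == "K" || c == "Q" || c == "J"))
      = ch :: rest.filter (fun c => !(c == "A" || c == "K" || c == "Q" || c == "J")) :=
    List.filter_cons_of_pos (by
      simp only [Bool.not_eq_true', Bool.or_eq_false_iff, beq_eq_false_iff_ne, ne_eq]
      exact ⟨⟨⟨hA, fun h => hF (Or.inl h)⟩, fun h => hF (Or.inr (Or.inr h))⟩,
        fun h => hF (Or.inr (Or.inl h))⟩)
  have hcnt : ∀ v : String, ch ≠ v → (ch :: rest).count v = rest.count v := by
    intro v hv; simp [hv]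
  simp only [dealerLow, dealerPips, hfil, List.foldl_cons]
  rw [hcnt "A" hA, hcnt "K" (fun h => hF (Or.inl h)),
      hcnt "Q" (fun h => hF (Or.inr (Or.inr h))), hcnt "J" (fun h => hF (Or.inr (Or.inl h)))]
  rw [pips_shift _ (0 + _)]
  ring

theorem count_A_cons_ne (ch : String) (rest : List String) (hA : ¬ ch = "A") :
    ((ch :: rest).count "A" : Int) = (rest.count "A" : Int) := by
  have h : ((("A" : String) == ch) : Bool) = false := by
    simp only [beq_eq_false_iff_ne, ne_eq]
    exact fun h => hA h.symm
  simp [List.count_cons]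
  exact hA

-- Invariant: A's fold from (x, y) lands at (x + low, y + low + 10*aces).
theorem dealerFold_eq (card : List String) : ∀ (x y : Int),
    dealerFoldA card (x, y) = (x + dealerLow card, y + dealerLow card + 10 * (card.count "A" : Int)) := by
  induction card with
  | nil => intro x y; simp [dealerFoldA, dealerLow, dealerPips]
  | cons ch rest ih =>
    intro x y
    simp only [dealerFoldA, List.foldl_cons] at *
    by_cases hA : ch = "A"
    · subst hA
      rw [show ((("A":String) == "A") : Bool) = true by decide]
      simp only [if_pos]
      rw [ih, low_cons_A]
      simp only [Prod.mk.injEq, List.count_cons]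
      constructor <;> · norm_num; ring
    · rw [if_neg (by simpa using hA)]
      by_cases hF : ch = "K" ∨ ch = "J" ∨ ch = "Q"
      · have hb : (ch == "K" || ch == "J" || ch == "Q") = true := by
          rcases hF with h | h | h <;> subst h <;> decide
        rw [if_pos hb, ih, low_cons_face ch rest hF, count_A_cons_ne ch rest hA]
        simp only [Prod.mk.injEq]
        constructor <;> ring
      · have hb : (ch == "K" || ch == "J" || ch == "Q") = false := by
          simp only [Bool.or_eq_false_iff, beq_eq_false_iff_ne, ne_eq]
          exact ⟨⟨fun h => hF (Or.inl h), fun h => hF (Or.inr (Or.inl h))⟩,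
            fun h => hF (Or.inr (Or.inr h))⟩
        rw [if_neg (by simp [hb]), ih, low_cons_other ch rest hA hF, count_A_cons_ne ch rest hA]
        simp only [Prod.mk.injEq]
        constructor <;> ring

-- ===== VERDICT (by name: the statement is the Claim_ definition above) =====
theorem dealer_spec : Claim_equal_dealer := by
  intro card _ _
  show dealer card = dealer_alt card
  simp only [dealer, dealer_alt, dealerFold_eq card 0 0, zero_add]
  have hlow : dealerPips card
      + 10 * ((card.count "K" : Int) + (card.count "Q" : Int) + (card.count "J" : Int))
      + (card.count "A" : Int) = dealerLow card := rfl
  rw [hlow]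
  split_ifs <;> first | rfl | tauto
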